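-- pv_equiv track=rewrite | github.com/comery/HIFI-barcode-hiseq | test_src/genome-assembly.py | follow_tour
-- ===== SOURCE A (Python) =====
-- def edges(graph):
--     """List all directed edges of `graph`"""
--     for node in graph:
--         for target in graph[node]:
--             yield (node, target)
--
-- def follow_tour(tour, graph):
--     """Follow a tour and check it is eulerian"""
--     edges_ = list(edges(graph))
--     for start, end in zip(tour, tour[1:]):
--         try:
--             edges_.remove((start, end))
--         # most likely removing an edge that was already used
--         except:
--             return False
--
--     # if there are any edges left this is neither
--     # an eulerian tour nor an eulerian trail
--     if edges_:
--         return False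
--     else:
--         return True
-- ===== SOURCE B (Python) =====
-- def follow_tour(tour, graph):
--     """Follow a tour and check it is eulerian"""
--     needed = sorted((node, target) for node in graph for target in graph[node])
--     used = sorted(zip(tour, tour[1:]))
--     return needed == used
-- ===== Notes on version B (the rewrite author's own statement) =====
-- stated objective: simpler
-- what changed: Replaces A's incremental remove-with-early-exit loop over the edge list by building both multisets (graph edges and consecutive tour steps) and comparing them via one sorted-list equality.
import Mathlib
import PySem

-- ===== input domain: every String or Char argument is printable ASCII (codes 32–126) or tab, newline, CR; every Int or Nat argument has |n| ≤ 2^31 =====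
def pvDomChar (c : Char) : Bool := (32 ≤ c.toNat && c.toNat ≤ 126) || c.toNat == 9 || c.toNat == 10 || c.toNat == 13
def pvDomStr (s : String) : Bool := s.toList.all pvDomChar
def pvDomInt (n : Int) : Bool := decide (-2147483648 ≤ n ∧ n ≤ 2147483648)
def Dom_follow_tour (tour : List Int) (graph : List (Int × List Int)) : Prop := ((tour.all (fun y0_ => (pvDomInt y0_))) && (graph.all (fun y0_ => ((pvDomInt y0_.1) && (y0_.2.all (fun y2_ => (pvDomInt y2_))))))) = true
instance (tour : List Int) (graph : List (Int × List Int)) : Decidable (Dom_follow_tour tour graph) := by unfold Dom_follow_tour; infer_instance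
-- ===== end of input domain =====

-- B replaces A's scan-with-remove-and-early-exit over the edge list by comparing the sorted
-- multiset of graph edges with the sorted multiset of consecutive tour steps (objective: simpler).

-- ===== PORT A =====
-- helper `edges(graph)`: the directed edges, in dict-iteration order
def edgesA (graph : List (Int × List Int)) : List (Int × Int) :=
  graph.flatMap (fun p => p.2.map (fun t => (p.1, t)))

-- the `for start, end in zip(tour, tour[1:])` loop: remove each step, False on a failed remove
def followLoop : List (Int × Int) → List (Int × Int) → Bool
  | es, [] => es.isEmpty
  | es, st :: sts =>
      match PySem.List.remove? es st with
      | none => false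
      | some es' => followLoop es' sts

def follow_tour (tour : List Int) (graph : List (Int × List Int)) : Bool :=
  followLoop (edgesA graph) (tour.zip (PySem.List.slice tour (some 1) none))

-- ===== PORT B =====
def follow_tour_alt (tour : List Int) (graph : List (Int × List Int)) : Bool :=
  let needed := PySem.List.sorted2 (graph.flatMap (fun p => p.2.map (fun t => (p.1, t)))) Prod.fst Prod.snd
  let used := PySem.List.sorted2 (tour.zip (PySem.List.slice tour (some 1) none)) Prod.fst Prod.snd
  needed == used

-- ===== PRECONDITION & SPEC =====
def Spec_follow_tour (tour : List Int) (graph : List (Int × List Int)) (out : Bool) : Prop := out = follow_tour_alt tour graph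
instance (tour : List Int) (graph : List (Int × List Int)) (out : Bool) : Decidable (Spec_follow_tour tour graph out) := by unfold Spec_follow_tour; infer_instance

-- ===== CLAIM (what is proved, stated in full; the proofs are below) =====
def Claim_equal_follow_tour : Prop := ∀ (tour : List Int) (graph : List (Int × List Int)), Dom_follow_tour tour graph → Spec_follow_tour tour graph (follow_tour tour graph)

-- ===== LEMMAS AND PROOFS =====

-- A's loop succeeds exactly when the steps are a permutation of the edge list
theorem followLoop_eq_true_iff (sts : List (Int × Int)) : ∀ (es : List (Int × Int)),
    followLoop es sts = true ↔ sts.Perm es := by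
  induction sts with
  | nil =>
      intro es
      cases es <;> simp [followLoop, List.nil_perm]
  | cons st sts ih =>
      intro es
      simp only [followLoop]
      by_cases hmem : st ∈ es
      · rw [PySem.List.remove?_eq_some_erase es st hmem]
        simp [ih, List.cons_perm_iff_perm_erase, hmem]
      · rw [(PySem.List.remove?_eq_none_iff es st).2 hmem]
        simp [List.cons_perm_iff_perm_erase, hmem]

-- sorted2 with fst/snd keys is PySem.List.sorted with the lexicographic key
theorem sorted2_fst_snd_eq_sorted_toLex (xs : List (Int × Int)) :
    PySem.List.sorted2 xs Prod.fst Prod.snd = PySem.List.sorted xs (fun p => (toLex p : Lex (Int × Int))) := by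
  have hbe : (fun (a b : Int × Int) => decide (a.1 < b.1) || (!decide (b.1 < a.1) && decide (a.2 < b.2)))
      = (fun (a b : Int × Int) => decide ((toLex a : Lex (Int × Int)) < toLex b)) := by
    funext a b
    simp only [Prod.Lex.lt_iff, ofLex_toLex]
    by_cases h1 : a.1 < b.1 <;> by_cases h2 : b.1 < a.1 <;> by_cases h3 : a.2 < b.2 <;>
      simp [h1, h2, h3] <;> omega
  show List.foldl (fun acc x => PySem.List.insertBy
      (fun a b => decide (a.1 < b.1) || (!decide (b.1 < a.1) && decide (a.2 < b.2))) x acc) [] xs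
    = List.foldl (fun acc x => PySem.List.insertBy
      (fun a b => decide ((toLex a : Lex (Int × Int)) < toLex b)) x acc) [] xs
  rw [hbe]

-- Python's  sorted(xs) == sorted(ys)  on pairs decides permutation
theorem sorted2_eq_iff_perm (xs ys : List (Int × Int)) :
    PySem.List.sorted2 xs Prod.fst Prod.snd = PySem.List.sorted2 ys Prod.fst Prod.snd ↔ xs.Perm ys := by
  constructor
  · intro h
    exact ((PySem.List.sorted2_perm xs Prod.fst Prod.snd false).symm.trans
      (h ▸ PySem.List.sorted2_perm ys Prod.fst Prod.snd false)).symm.symm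
  · intro hp
    rw [sorted2_fst_snd_eq_sorted_toLex, sorted2_fst_snd_eq_sorted_toLex]
    exact PySem.List.sorted_eq_sorted_of_perm xs ys _ toLex.injective hp

-- ===== VERDICT (by name: the statement is the Claim_ definition above) =====
theorem follow_tour_spec : Claim_equal_follow_tour := by
  intro tour graph _
  unfold Spec_follow_tour follow_tour follow_tour_alt edgesA
  show followLoop (graph.flatMap fun p => p.2.map fun t => (p.1, t))
      (tour.zip (PySem.List.slice tour (some 1) none))
    = (PySem.List.sorted2 (graph.flatMap fun p => p.2.map fun t => (p.1, t)) Prod.fst Prod.snd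
       == PySem.List.sorted2 (tour.zip (PySem.List.slice tour (some 1) none)) Prod.fst Prod.snd)
  rw [Bool.eq_iff_iff, beq_iff_eq,
    followLoop_eq_true_iff (tour.zip (PySem.List.slice tour (some 1) none)) _,
    sorted2_eq_iff_perm]
  exact List.perm_comm
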